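/- GENERATED by c/gen_decode.py: decode facts of the image, one per distinct instruction byte string. -/
import UserX.DecodeImage

#decode_all Vorbis.Dec
  "01c0"  -- add eax,eax
  "0f8201feffff"  -- jb 109b1e
  "0f84b9000000"  -- je 10c338
  "0f85d3030000"  -- jne 114af7
  "0f8e47010000"  -- jle 10f4a8
  "0fb6442404"  -- movzx eax,BYTE PTR [rsp+0x4]
  "29d0"  -- sub eax,edx
  "400fb6f6"  -- movzx esi,sil
  "410fb7d4"  -- movzx edx,r12w
  "4183c701"  -- add r15d,0x1
  "4189d5"  -- mov r13d,edx
  "41b910000000"  -- mov r9d,0x10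
  "420fb65c2311"  -- movzx ebx,BYTE PTR [rbx+r12*1+0x11]
  "4429e8"  -- sub eax,r13d
  "44892b"  -- mov DWORD PTR [rbx],r13d
  "4489b3d8060000"  -- mov DWORD PTR [rbx+0x6d8],r14d
  "448b6db8"  -- mov r13d,DWORD PTR [rbp-0x48]
  "450fb606"  -- movzx r8d,BYTE PTR [r14]
  "45897c2408"  -- mov DWORD PTR [r12+0x8],r15d
  "460fb7747302"  -- movzx r14d,WORD PTR [rbx+r14*2+0x2]
  "4839c7"  -- cmp rdi,rax
  "4869f648080000"  -- imul rsi,rsi,0x848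
  "4883ec28"  -- sub rsp,0x28
  "48898518ffffff"  -- mov QWORD PTR [rbp-0xe8],rax
  "488b45c0"  -- mov rax,QWORD PTR [rbp-0x40]
  "488baba8000000"  -- mov rbp,QWORD PTR [rbx+0xa8]
  "488d5c6d00"  -- lea rbx,[rbp+rbp*2+0x0]
  "488d7d20"  -- lea rdi,[rbp+0x20]
  "488dbb84000000"  -- lea rdi,[rbx+0x84]
  "488dbdb0000000"  -- lea rdi,[rbp+0xb0]
  "48c7442430b38ab541"  -- mov QWORD PTR [rsp+0x30],0x41b58ab3
  "4903b6a8000000"  -- add rsi,QWORD PTR [r14+0xa8]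
  "4989ae30080000"  -- mov QWORD PTR [r14+0x830],rbp
  "498d7c2404"  -- lea rdi,[r12+0x4]
  "498dbcc678050000"  -- lea rdi,[r14+rax*8+0x578]
  "4a8d3c73"  -- lea rdi,[rbx+r14*2]
  "4c037308"  -- add r14,QWORD PTR [rbx+0x8]
  "4c897c2410"  -- mov QWORD PTR [rsp+0x10],r15
  "4c8b742408"  -- mov r14,QWORD PTR [rsp+0x8]
  "4c8d7486f0"  -- lea r14,[rsi+rax*4-0x10]
  "4d89e6"  -- mov r14,r12
  "4f8d74b50c"  -- lea r14,[r13+r14*4+0xc]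
  "6639e8"  -- cmp ax,bp
  "6645896c2404"  -- mov WORD PTR [r12+0x4],r13w
  "7409"  -- je 100324
  "74a4"  -- je 1076de
  "760e"  -- jbe 1029c5
  "7d46"  -- jge 10f69d
  "7f46"  -- jg 109015
  "81ffffffff1f"  -- cmp edi,0x1fffffff
  "83f8ff"  -- cmp eax,0xffffffff
  "895c2408"  -- mov DWORD PTR [rsp+0x8],ebx
  "89cb"  -- mov ebx,ecx
  "8b4c2430"  -- mov ecx,DWORD PTR [rsp+0x30]
  "8b8540080000"  -- mov eax,DWORD PTR [rbp+0x840]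
  "8d8301fcffff"  -- lea eax,[rbx-0x3ff]
  "c1e002"  -- shl eax,0x2
  "c745fcffffffff"  -- mov DWORD PTR [rbp-0x4],0xffffffff
  "c78568ffffff00000000"  -- mov DWORD PTR [rbp-0x98],0x0
  "e807edfeff"  -- call 100300
  "e8118fffff"  -- call 10d040
  "e81b28ffff"  -- call 100640
  "e82512ffff"  -- call 100480
  "e82dbeffff"  -- call 10d1c0
  "e837e5feff"  -- call 108000
  "e84372ffff"  -- call 100640
  "e84d88ffff"  -- call 1008e0
  "e8581affff"  -- call 100800
  "e86639ffff"  -- call 100720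
  "e87122ffff"  -- call 100640
  "e87b8fffff"  -- call 100800
  "e887c3feff"  -- call 100720
  "e89184ffff"  -- call 104c60
  "e89b67ffff"  -- call 100640
  "e8a60fffff"  -- call 104c60
  "e8b018ffff"  -- call 100640
  "e8b9adfeff"  -- call 1003c0
  "e8c460ffff"  -- call 103d00
  "e8cd9efeff"  -- call 100300
  "e8d86bffff"  -- call 100640
  "e8e1aefeff"  -- call 1003c0
  "e8eb9efeff"  -- call 1003c0
  "e8f322ffff"  -- call 100640
  "e8fec6feff"  -- call 100800
  "e93ffdffff"  -- jmp 10dc9e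
  "e98c030000"  -- jmp 10f6a0
  "e9e10d0000"  -- jmp 111a3e
  "eb50"  -- jmp 11109c
  "ebcf"  -- jmp 102a99
  "f20f2ad8"  -- cvtsi2sd xmm3,eax
  "f20f5cc2"  -- subsd xmm0,xmm2
  "f30f104b04"  -- movss xmm1,DWORD PTR [rbx+0x4]
  "f30f106c2424"  -- movss xmm5,DWORD PTR [rsp+0x24]
  "f30f114bf8"  -- movss DWORD PTR [rbx-0x8],xmm1
  "f30f116da8"  -- movss DWORD PTR [rbp-0x58],xmm5
  "f30f586c2410"  -- addss xmm5,DWORD PTR [rsp+0x10]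
  "f30f59c6"  -- mulss xmm0,xmm6
  "f30f5cf2"  -- subss xmm6,xmm2
  "f3410f116604"  -- movss DWORD PTR [r14+0x4],xmm4
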